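-- pv_equiv track=rewrite | github.com/Kislv/MastersDegreeProject | processing/features/find_most_correlated.py | pairs_list_2_sets
-- ===== SOURCE A (Python) =====
-- from typing import (
--     List,
--     Set,
--     Tuple,
-- )
--
-- def pairs_list_2_sets(pairs_list:List[List[str]] )->List[Set[str]]:
--     sets_list:List[Set[str]] = []
--     for pair in pairs_list:
--         pair_set:Set[str] = set(pair)
--         if len(sets_list) == 0:
--             sets_list.append(pair_set)
--             continue
--         sets_indices_to_union:List[int] = []
--         for i, result_set in enumerate(sets_list):
--             for pair_item in pair_set:
--                 if pair_item in result_set: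
--                     sets_indices_to_union.append(i)
--                     break
--         len_sets_indices_to_union:int = len(sets_indices_to_union)
--         if len_sets_indices_to_union == 0:
--             sets_list.append(pair_set)
--             continue
--         elif len_sets_indices_to_union == 1:
--             sets_list[sets_indices_to_union[0]].update(pair_set)
--         else:
--             sets_list[sets_indices_to_union[0]].update(sets_list[sets_indices_to_union[1]])
--             del sets_list[sets_indices_to_union[1]]
--     return sets_list
-- ===== SOURCE B (Python) =====
-- def pairs_list_2_sets(pairs_list):
--     sets_list = []
--     owner = {}  # element -> index (in sets_list) of the set containing it
--     for pair in pairs_list: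
--         pair_set = set(pair)
--         ids = sorted({owner[x] for x in pair_set if x in owner})
--         if not ids:
--             for x in pair_set:
--                 owner[x] = len(sets_list)
--             sets_list.append(pair_set)
--         elif len(ids) == 1:
--             i = ids[0]
--             sets_list[i] |= pair_set
--             for x in pair_set:
--                 owner[x] = i
--         else:
--             i, j = ids[0], ids[1]
--             sets_list[i] |= sets_list[j]
--             del sets_list[j]
--             owner = {x: (i if k == j else k - 1 if k > j else k)
--                      for x, k in owner.items()}
--     return sets_list
-- ===== Notes on version B (the rewrite author's own statement) =====
-- stated objective: alternative
-- what changed: B replaces A's per-pair scan over every accumulated set with an element-to-set-index dictionary: matching set indices come from O(|pair|) hash lookups, and the merge branch renumbers the dictionary in one pass; A's inner enumerate-scan disappears.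
import Mathlib
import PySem

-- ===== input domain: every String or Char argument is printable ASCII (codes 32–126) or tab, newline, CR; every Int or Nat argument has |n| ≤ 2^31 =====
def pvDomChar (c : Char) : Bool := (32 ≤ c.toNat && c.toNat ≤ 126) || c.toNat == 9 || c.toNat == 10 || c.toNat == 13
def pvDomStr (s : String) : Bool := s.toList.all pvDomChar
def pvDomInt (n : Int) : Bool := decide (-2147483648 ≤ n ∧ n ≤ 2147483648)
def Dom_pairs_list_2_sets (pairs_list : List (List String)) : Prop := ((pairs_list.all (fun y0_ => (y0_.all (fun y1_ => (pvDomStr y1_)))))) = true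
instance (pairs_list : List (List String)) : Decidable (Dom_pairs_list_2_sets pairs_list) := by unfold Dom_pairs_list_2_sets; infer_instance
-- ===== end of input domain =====

-- B replaces A's per-pair scan over every accumulated set with an element→slot-index dictionary
-- (objective: alternative — the inner enumerate-scan disappears); same return value, no argument is mutated.

-- ===== PORT A =====
-- A's inner double loop: for (i, result_set) in enumerate(sets_list): append i on the first pair item hit
def pvIdxs (pair_set : PySem.Set String) (sets_list : List (PySem.Set String)) : List Int :=
  (PySem.List.enumerate sets_list).foldl
    (fun acc p => if pair_set.any (fun y => PySem.Set.contains p.2 y) then acc ++ [p.1] else acc) []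

def pvStepA (sets_list : List (PySem.Set String)) (pair : List String) : List (PySem.Set String) :=
  let pair_set : PySem.Set String := PySem.Set.ofList pair
  if sets_list.length = 0 then sets_list ++ [pair_set]
  else
    match pvIdxs pair_set sets_list with
    | [] => sets_list ++ [pair_set]
    | [i] =>
        PySem.List.pySetD sets_list i
          (PySem.Set.update (PySem.List.pyGetD sets_list i []) pair_set)
    | i :: j :: _ =>
        -- 'del sets_list[j]' ported by hand as eraseIdx j.toNat (exact: j is a 0 ≤ index < length from enumerate)
        (PySem.List.pySetD sets_list i
          (PySem.Set.update (PySem.List.pyGetD sets_list i []) (PySem.List.pyGetD sets_list j []))).eraseIdx j.toNat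

def pairs_list_2_sets (pairs_list : List (List String)) : List (List String) :=
  pairs_list.foldl pvStepA []

-- ===== PORT B =====
-- B's index lookup: sorted({owner[x] for x in pair_set if x in owner})
def pvIds (owner : PySem.Dict String Int) (pair_set : PySem.Set String) : List Int :=
  PySem.List.sorted (PySem.Set.ofList (pair_set.filterMap (fun x => owner.get? x))) (fun i => i) false

def pvStepB (st : List (PySem.Set String) × PySem.Dict String Int) (pair : List String) :
    List (PySem.Set String) × PySem.Dict String Int :=
  let sets_list := st.1
  let owner := st.2
  let pair_set : PySem.Set String := PySem.Set.ofList pair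
  match pvIds owner pair_set with
  | [] =>
      (sets_list ++ [pair_set],
       pair_set.foldl (fun d x => d.insert x (PySem.List.len sets_list)) owner)
  | [i] =>
      (PySem.List.pySetD sets_list i
         (PySem.Set.update (PySem.List.pyGetD sets_list i []) pair_set),
       pair_set.foldl (fun d x => d.insert x i) owner)
  | i :: j :: _ =>
      ((PySem.List.pySetD sets_list i
          (PySem.Set.update (PySem.List.pyGetD sets_list i []) (PySem.List.pyGetD sets_list j []))).eraseIdx j.toNat,
       -- owner = {x: (i if k == j else k - 1 if k > j else k) for x, k in owner.items()}
       PySem.Dict.mk (owner.items.map (fun kv =>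
         (kv.1, if kv.2 = j then i else if j < kv.2 then kv.2 - 1 else kv.2))))

def pairs_list_2_sets_alt (pairs_list : List (List String)) : List (List String) :=
  (pairs_list.foldl pvStepB ([], PySem.Dict.empty)).1

-- ===== PRECONDITION & SPEC =====
def Spec_pairs_list_2_sets (pairs_list : List (List String)) (out : List (List String)) : Prop := out = pairs_list_2_sets_alt pairs_list
instance (pairs_list : List (List String)) (out : List (List String)) : Decidable (Spec_pairs_list_2_sets pairs_list out) := by unfold Spec_pairs_list_2_sets; infer_instance

-- ===== CLAIM (what is proved, stated in full; the proofs are below) =====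
def Claim_equal_pairs_list_2_sets : Prop := ∀ (pairs_list : List (List String)), Dom_pairs_list_2_sets pairs_list → Spec_pairs_list_2_sets pairs_list (pairs_list_2_sets pairs_list)

-- ===== LEMMAS AND PROOFS =====

-- Loop invariant: B's dictionary maps an element to the index of the accumulated set containing it.
def pvInv (sets : List (PySem.Set String)) (owner : PySem.Dict String Int) : Prop :=
  ∀ (x : String) (i : Int),
    owner.get? x = some i ↔ ∃ k : Nat, k < sets.length ∧ i = (k : Int) ∧ x ∈ sets.getD k []

lemma pv_mem_idxs (ps : PySem.Set String) (sets : List (PySem.Set String)) (i : Int) :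
    i ∈ pvIdxs ps sets ↔ ∃ k : Nat, k < sets.length ∧ i = (k : Int) ∧ ∃ x ∈ ps, x ∈ sets.getD k [] := by
  rw [pvIdxs, PySem.List.foldl_append_if]
  simp only [List.nil_append, List.mem_map, List.mem_filter, PySem.List.mem_enumerate_iff]
  constructor
  · rintro ⟨⟨a, S⟩, ⟨⟨k, hk, hpe⟩, hany⟩, rfl⟩
    injection hpe with h1 h2
    subst h2
    refine ⟨k, hk, by simpa using h1, ?_⟩
    rw [List.any_eq_true] at hany
    obtain ⟨x, hx, hc⟩ := hany
    rw [PySem.Set.contains_iff] at hc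
    exact ⟨x, hx, by rwa [List.getD_eq_getElem?_getD, List.getElem?_eq_getElem hk]⟩
  · rintro ⟨k, hk, rfl, x, hx, hxin⟩
    refine ⟨((k : Int), sets[k]), ⟨⟨k, hk, by simp⟩, ?_⟩, rfl⟩
    simp only [List.any_eq_true]
    exact ⟨x, hx, by
      rw [PySem.Set.contains_iff]
      rwa [List.getD_eq_getElem?_getD, List.getElem?_eq_getElem hk] at hxin⟩

lemma pv_pairwise_idxs (ps : PySem.Set String) (sets : List (PySem.Set String)) :
    (pvIdxs ps sets).Pairwise (· < ·) := by
  rw [pvIdxs, PySem.List.foldl_append_if]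
  simp only [List.nil_append]
  exact ((PySem.List.pairwise_lt_enumerate sets 0).filter _).map _ (fun {a b} h => h)

lemma pv_mem_ids (owner : PySem.Dict String Int) (ps : PySem.Set String) (i : Int) :
    i ∈ pvIds owner ps ↔ ∃ x ∈ ps, owner.get? x = some i := by
  rw [pvIds, PySem.List.mem_sorted]
  simp [PySem.Set.mem_ofList, List.mem_filterMap]

lemma pv_pairwise_ids (owner : PySem.Dict String Int) (ps : PySem.Set String) :
    (pvIds owner ps).Pairwise (· < ·) :=
  PySem.List.sorted_ofList_pairwise_lt _

lemma pv_eq_of_pairwise_lt (l₁ l₂ : List Int) (h₁ : l₁.Pairwise (· < ·)) (h₂ : l₂.Pairwise (· < ·))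
    (hm : ∀ i, i ∈ l₁ ↔ i ∈ l₂) : l₁ = l₂ := by
  have hp : l₁.Perm l₂ := (List.perm_ext_iff_of_nodup
    (h₁.imp fun h => ne_of_lt h) (h₂.imp fun h => ne_of_lt h)).2 hm
  exact hp.eq_of_pairwise (fun a b _ _ hab hba => absurd hba (lt_asymm hab)) h₁ h₂

lemma pv_idxs_eq_ids (ps : PySem.Set String) (sets : List (PySem.Set String))
    (owner : PySem.Dict String Int) (hInv : pvInv sets owner) :
    pvIdxs ps sets = pvIds owner ps := by
  refine pv_eq_of_pairwise_lt _ _ (pv_pairwise_idxs ps sets) (pv_pairwise_ids owner ps) ?_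
  intro i
  rw [pv_mem_idxs, pv_mem_ids]
  constructor
  · rintro ⟨k, hk, rfl, x, hx, hxk⟩
    exact ⟨x, hx, (hInv x _).2 ⟨k, hk, rfl, hxk⟩⟩
  · rintro ⟨x, hx, hg⟩
    obtain ⟨k, hk, rfl, hxk⟩ := (hInv x _).1 hg
    exact ⟨k, hk, rfl, x, hx, hxk⟩

lemma pv_get?_foldl_insert_const (ps : List String) (d : PySem.Dict String Int) (c : Int) (y : String) :
    (ps.foldl (fun d x => d.insert x c) d).get? y = if y ∈ ps then some c else d.get? y := by
  induction ps generalizing d with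
  | nil => simp
  | cons a t ih =>
    simp only [List.foldl_cons, ih, PySem.Dict.get?_insert, List.mem_cons]
    by_cases h1 : y ∈ t <;> by_cases h2 : y = a <;> simp [h1, h2]

lemma pv_get?_mapVal (f : Int → Int) (d : PySem.Dict String Int) (y : String) :
    (PySem.Dict.mk (d.items.map (fun kv => (kv.1, f kv.2)))).get? y = (d.get? y).map f := by
  obtain ⟨l⟩ := d
  induction l with
  | nil => simp [PySem.Dict.get?]
  | cons p t ih =>
    obtain ⟨k, v⟩ := p
    simp only [List.map_cons, PySem.Dict.get?_mk_cons, ih]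
    by_cases h : (k == y) <;> simp [h]

lemma pv_getD_set {α : Type} (l : List α) (i k : Nat) (u : α) (d : α) (hk : k < l.length) :
    (l.set i u).getD k d = if k = i then u else l.getD k d := by
  rw [List.getD_eq_getElem?_getD, List.getElem?_set, List.getD_eq_getElem?_getD]
  by_cases h : i = k
  · subst h; rw [if_pos rfl, if_pos rfl, if_pos hk]; rfl
  · rw [if_neg h, if_neg (fun hh => h hh.symm)]

lemma pv_getD_eraseIdx_lt {α : Type} (l : List α) (i k : Nat) (d : α) (hk : k < i) :
    (l.eraseIdx i).getD k d = l.getD k d := by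
  rw [List.getD_eq_getElem?_getD, List.getElem?_eraseIdx, List.getD_eq_getElem?_getD, if_pos hk]

lemma pv_getD_eraseIdx_ge {α : Type} (l : List α) (i k : Nat) (d : α) (hk : i ≤ k) :
    (l.eraseIdx i).getD k d = l.getD (k + 1) d := by
  rw [List.getD_eq_getElem?_getD, List.getElem?_eraseIdx, List.getD_eq_getElem?_getD,
    if_neg (by omega)]

lemma pv_step (sets : List (PySem.Set String)) (owner : PySem.Dict String Int)
    (pair : List String) (h : pvInv sets owner) :
    pvStepA sets pair = (pvStepB (sets, owner) pair).1 ∧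
      pvInv (pvStepB (sets, owner) pair).1 (pvStepB (sets, owner) pair).2 := by
  have hIdx := pv_idxs_eq_ids (PySem.Set.ofList pair) sets owner h
  rcases hids : pvIds owner (PySem.Set.ofList pair) with _ | ⟨i, _ | ⟨j, rest⟩⟩
  · -- no accumulated set meets the pair: both append, new elements get index len(sets)
    have hnone : ∀ x ∈ PySem.Set.ofList pair, owner.get? x = none := by
      intro x hx
      cases hg : owner.get? x with
      | none => rfl
      | some i =>
        have : i ∈ pvIds owner (PySem.Set.ofList pair) := (pv_mem_ids _ _ _).2 ⟨x, hx, hg⟩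
        rw [hids] at this; simp at this
    constructor
    · by_cases hl : sets.length = 0 <;>
        simp [pvStepA, pvStepB, hl, hIdx, hids]
    · simp only [pvStepB, hids]
      intro y i
      rw [pv_get?_foldl_insert_const]
      by_cases hy : y ∈ PySem.Set.ofList pair
      · rw [if_pos hy]
        constructor
        · rintro h'
          injection h' with h'
          refine ⟨sets.length, by simp, by simpa [PySem.List.len_eq] using h'.symm, ?_⟩
          rw [List.getD_eq_getElem?_getD, List.getElem?_append_right (le_refl _)]
          simpa using hy
        · rintro ⟨k, hk, rfl, hyk⟩
          rcases Nat.lt_or_ge k sets.length with hlt | hge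
          · exfalso
            rw [List.getD_eq_getElem?_getD, List.getElem?_append_left hlt,
              ← List.getD_eq_getElem?_getD] at hyk
            have := (h y (k : Int)).2 ⟨k, hlt, rfl, hyk⟩
            rw [hnone y hy] at this; simp at this
          · have : k = sets.length := by
              have := hk; simp [List.length_append] at this; omega
            subst this; simp [PySem.List.len_eq]
      · rw [if_neg hy, h y i]
        constructor
        · rintro ⟨k, hk, rfl, hyk⟩
          refine ⟨k, by simp [List.length_append]; omega, rfl, ?_⟩
          rw [List.getD_eq_getElem?_getD, List.getElem?_append_left hk, ← List.getD_eq_getElem?_getD]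
          exact hyk
        · rintro ⟨k, hk, rfl, hyk⟩
          rcases Nat.lt_or_ge k sets.length with hlt | hge
          · rw [List.getD_eq_getElem?_getD, List.getElem?_append_left hlt,
              ← List.getD_eq_getElem?_getD] at hyk
            exact ⟨k, hlt, rfl, hyk⟩
          · exfalso
            have hkeq : k = sets.length := by
              simp [List.length_append] at hk; omega
            subst hkeq
            rw [List.getD_eq_getElem?_getD, List.getElem?_append_right (le_refl _)] at hyk
            simp at hyk
            exact hy ((PySem.Set.mem_ofList pair y).2 hyk)
  · -- exactly one accumulated set meets the pair
    obtain ⟨k0, hk0, hi, x0, hx0, hx0k⟩ := (pv_mem_idxs _ _ i).1 (by rw [hIdx, hids]; simp)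
    subst hi
    have hlen0 : ¬ sets.length = 0 := by omega
    have huniq : ∀ x ∈ PySem.Set.ofList pair, ∀ k : Nat, k < sets.length →
        x ∈ sets.getD k [] → k = k0 := by
      intro x hx k hk hxk
      have : (k : Int) ∈ pvIds owner (PySem.Set.ofList pair) :=
        (pv_mem_ids _ _ _).2 ⟨x, hx, (h x _).2 ⟨k, hk, rfl, hxk⟩⟩
      rw [hids] at this
      simp at this
      exact_mod_cast this
    constructor
    · simp [pvStepA, pvStepB, hlen0, hIdx, hids]
    · simp only [pvStepB, hids, PySem.List.pySetD_natCast, PySem.List.pyGetD_natCast]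
      intro y i'
      rw [pv_get?_foldl_insert_const]
      by_cases hy : y ∈ PySem.Set.ofList pair
      · rw [if_pos hy]
        constructor
        · rintro h'
          injection h' with h'
          refine ⟨k0, by simpa using hk0, h'.symm, ?_⟩
          rw [pv_getD_set _ _ _ _ _ hk0, if_pos rfl]
          exact (PySem.Set.mem_update _ _ _).2 (Or.inr hy)
        · rintro ⟨k, hk, rfl, hyk⟩
          rw [List.length_set] at hk
          rw [pv_getD_set _ _ _ _ _ hk] at hyk
          by_cases hkk : k = k0
          · subst hkk; rfl
          · rw [if_neg hkk] at hyk
            exact absurd (huniq y hy k hk hyk) hkk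
      · rw [if_neg hy, h y i']
        have hcell : ∀ k : Nat, k < sets.length →
            (y ∈ (sets.set k0 (PySem.Set.update (sets.getD k0 []) (PySem.Set.ofList pair))).getD k []
              ↔ y ∈ sets.getD k []) := by
          intro k hk
          rw [pv_getD_set _ _ _ _ _ hk]
          by_cases hkk : k = k0
          · subst hkk
            rw [if_pos rfl, PySem.Set.mem_update]
            simp [hy]
          · rw [if_neg hkk]
        constructor
        · rintro ⟨k, hk, rfl, hyk⟩
          exact ⟨k, by simpa using hk, rfl, (hcell k hk).2 hyk⟩
        · rintro ⟨k, hk, rfl, hyk⟩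
          rw [List.length_set] at hk
          exact ⟨k, hk, rfl, (hcell k hk).1 hyk⟩
  · -- at least two accumulated sets meet the pair: merge the first two, pair items are dropped
    obtain ⟨k0, hk0, hi, _⟩ := (pv_mem_idxs _ _ i).1 (by rw [hIdx, hids]; simp)
    obtain ⟨k1, hk1, hj, _⟩ := (pv_mem_idxs _ _ j).1 (by rw [hIdx, hids]; simp)
    subst hi; subst hj
    have hij : (k0 : Int) < (k1 : Int) := by
      have hpw := pv_pairwise_ids owner (PySem.Set.ofList pair)
      rw [hids, List.pairwise_cons] at hpw
      exact hpw.1 _ (by simp)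
    have hkk : k0 < k1 := by exact_mod_cast hij
    have hlen0 : ¬ sets.length = 0 := by omega
    constructor
    · simp [pvStepA, pvStepB, hlen0, hIdx, hids]
    · simp only [pvStepB, hids, PySem.List.pySetD_natCast, PySem.List.pyGetD_natCast]
      intro y i'
      rw [pv_get?_mapVal (fun m => if m = (k1 : Int) then (k0 : Int) else if (k1 : Int) < m then m - 1 else m) owner y]
      set U := PySem.Set.update (sets.getD k0 []) (sets.getD k1 []) with hU
      have hlset : (sets.set k0 U).length = sets.length := List.length_set ..
      have hlerase : ((sets.set k0 U).eraseIdx ((k1 : Int).toNat)).length = sets.length - 1 := by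
        rw [Int.toNat_natCast, List.length_eraseIdx, if_pos (by omega)]
        omega
      have htn : ((k1 : Int)).toNat = k1 := Int.toNat_natCast k1
      have hcell_lt : ∀ k : Nat, k < k1 →
          ((sets.set k0 U).eraseIdx ((k1 : Int).toNat)).getD k []
            = if k = k0 then U else sets.getD k [] := by
        intro k hk
        rw [htn, pv_getD_eraseIdx_lt _ _ _ _ hk, pv_getD_set _ _ _ _ _ (by omega)]
      have hcell_ge : ∀ k : Nat, k1 ≤ k → k < sets.length - 1 →
          ((sets.set k0 U).eraseIdx ((k1 : Int).toNat)).getD k [] = sets.getD (k + 1) [] := by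
        intro k hk hk'
        rw [htn, pv_getD_eraseIdx_ge _ _ _ _ hk, pv_getD_set _ _ _ _ _ (by omega),
          if_neg (by omega)]
      rw [hlerase]
      constructor
      · rintro hmap
        rw [Option.map_eq_some_iff] at hmap
        obtain ⟨m, hm, hfm⟩ := hmap
        obtain ⟨km, hkm, rfl, hykm⟩ := (h y m).1 hm
        rcases Nat.lt_trichotomy km k1 with hlt | heq | hgt
        · -- f km = km, cell km unchanged (or inside U when km = k0)
          have hf : i' = (km : Int) := by
            rw [if_neg (by exact_mod_cast Nat.ne_of_lt hlt), if_neg (by exact_mod_cast not_lt.2 (le_of_lt hlt))] at hfm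
            exact hfm.symm
          refine ⟨km, by omega, hf, ?_⟩
          rw [hcell_lt km hlt]
          by_cases hkm0 : km = k0
          · subst hkm0
            rw [if_pos rfl, hU, PySem.Set.mem_update]
            exact Or.inl hykm
          · rw [if_neg hkm0]; exact hykm
        · -- km = k1: its elements move into slot k0
          subst heq
          have hf : i' = (k0 : Int) := by rw [if_pos rfl] at hfm; exact hfm.symm
          refine ⟨k0, by omega, hf, ?_⟩
          rw [hcell_lt k0 hkk, if_pos rfl, hU, PySem.Set.mem_update]
          exact Or.inr hykm
        · -- km > k1: slot shifts down by one
          have hf : i' = ((km - 1 : Nat) : Int) := by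
            rw [if_neg (by exact_mod_cast Nat.ne_of_gt hgt), if_pos (by exact_mod_cast hgt)] at hfm
            rw [← hfm]
            omega
          refine ⟨km - 1, by omega, hf, ?_⟩
          rw [hcell_ge (km - 1) (by omega) (by omega), Nat.sub_add_cancel (by omega)]
          exact hykm
      · rintro ⟨k, hk, rfl, hyk⟩
        rw [Option.map_eq_some_iff]
        rcases Nat.lt_or_ge k k1 with hlt | hge
        · rw [hcell_lt k hlt] at hyk
          by_cases hkk0 : k = k0
          · rw [if_pos hkk0, hU, PySem.Set.mem_update] at hyk
            rcases hyk with hyk | hyk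
            · refine ⟨(k0 : Int), (h y _).2 ⟨k0, by omega, rfl, hyk⟩, ?_⟩
              rw [if_neg (by exact_mod_cast Nat.ne_of_lt hkk), if_neg (by exact_mod_cast not_lt.2 (le_of_lt hkk))]
              exact_mod_cast hkk0.symm
            · refine ⟨(k1 : Int), (h y _).2 ⟨k1, by omega, rfl, hyk⟩, ?_⟩
              rw [if_pos rfl]
              exact_mod_cast hkk0.symm
          · rw [if_neg hkk0] at hyk
            refine ⟨(k : Int), (h y _).2 ⟨k, by omega, rfl, hyk⟩, ?_⟩
            rw [if_neg (by exact_mod_cast Nat.ne_of_lt hlt), if_neg (by exact_mod_cast not_lt.2 (le_of_lt hlt))]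
        · rw [hcell_ge k hge hk] at hyk
          refine ⟨((k + 1 : Nat) : Int), (h y _).2 ⟨k + 1, by omega, rfl, hyk⟩, ?_⟩
          rw [if_neg (by exact_mod_cast Nat.ne_of_gt (by omega : k + 1 > k1)),
            if_pos (by exact_mod_cast (by omega : k1 < k + 1))]
          push_cast
          ring

lemma pv_main (pairs : List (List String)) :
    ∀ (sets : List (PySem.Set String)) (owner : PySem.Dict String Int), pvInv sets owner →
      pairs.foldl pvStepA sets = (pairs.foldl pvStepB (sets, owner)).1 := by
  induction pairs with
  | nil => intro sets owner _; simp
  | cons p t ih =>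
    intro sets owner h
    obtain ⟨heq, hinv⟩ := pv_step sets owner p h
    simp only [List.foldl_cons, heq]
    have := ih (pvStepB (sets, owner) p).1 (pvStepB (sets, owner) p).2 hinv
    simpa using this

-- ===== VERDICT (by name: the statement is the Claim_ definition above) =====
theorem pairs_list_2_sets_spec : Claim_equal_pairs_list_2_sets := by
  intro pairs _
  unfold Spec_pairs_list_2_sets pairs_list_2_sets pairs_list_2_sets_alt
  refine pv_main pairs [] PySem.Dict.empty ?_
  intro x i
  simp [PySem.Dict.get?_empty]
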